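-- pv_equiv track=rewrite | github.com/ubAI6689/CodeForces | Competition/Div2/Edu140/B_Block_Towers.py | max_blocks
-- ===== SOURCE A (Python) =====
-- def max_blocks(n, a):
--     # Initialize the maximum number of blocks as the number of blocks in the first tower
--     max_blocks = a[0]
--
--     # Iterate through the towers, starting from the second one
--     for i in range(1, n):
--         # If the number of blocks in the current tower is greater than the number of blocks in the first tower,
--         # move blocks from the current tower to the first tower until they have the same number of blocks
--         while a[i] > a[0]:
--             a[0] += 1
--             a[i] -= 1
--
--         # Update the maximum number of blocks with the current number of blocks in the first tower
--         max_blocks = max(max_blocks, a[0])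
--
--     # Return the maximum number of blocks
--     return max_blocks
-- ===== SOURCE B (Python) =====
-- def max_blocks(n, a):
--     # One pass: moving blocks one by one until a[i] <= a[0] just sets
--     # a[0] to ceil((a[0]+a[i])/2); a[0] only grows, so the answer is its
--     # final value. Does not mutate a (A does).
--     h = a[0]
--     for i in range(1, n):
--         if a[i] > h:
--             h = (h + a[i] + 1) // 2
--     return h
-- ===== Notes on version B (the rewrite author's own statement) =====
-- stated objective: faster
-- what changed: Replaces the inner one-block-at-a-time transfer loop and the running max with a single pass using the closed form h = ceil((h+a[i])/2), without mutating a.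
import Mathlib
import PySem

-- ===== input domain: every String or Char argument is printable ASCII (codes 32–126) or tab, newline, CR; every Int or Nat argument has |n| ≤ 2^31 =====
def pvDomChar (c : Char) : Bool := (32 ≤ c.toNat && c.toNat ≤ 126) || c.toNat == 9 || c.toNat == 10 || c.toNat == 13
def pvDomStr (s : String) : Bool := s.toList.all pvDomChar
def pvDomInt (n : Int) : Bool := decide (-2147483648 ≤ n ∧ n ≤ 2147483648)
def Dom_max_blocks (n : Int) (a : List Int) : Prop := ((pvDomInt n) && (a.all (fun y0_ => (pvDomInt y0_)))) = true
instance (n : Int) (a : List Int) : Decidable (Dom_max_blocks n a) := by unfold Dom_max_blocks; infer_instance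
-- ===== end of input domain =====

-- B replaces A's one-block-at-a-time inner while loop with the closed form
-- ceil((h+a[i])/2) in a single pass; A mutates the list a in place, B does not
-- (the equivalence proved is about the return value).

-- ===== PORT A =====
-- the inner `while a[i] > a[0]: a[0]+=1; a[i]-=1` loop, on the pair (a[0], a[i])
def pvWhileA (a0 ai : Int) : Int × Int :=
  if ai > a0 then pvWhileA (a0 + 1) (ai - 1) else (a0, ai)
termination_by (ai - a0).toNat
decreasing_by omega

def max_blocks (n : Int) (a : List Int) : Int :=
  -- a[0] (IndexError on empty a is excluded by Pre_)
  let a0 := (PySem.List.pyGet? a 0).getD 0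
  -- state: (max_blocks, current a[0]); a[i] reads the original list since
  -- A only ever writes positions 0 and the current i ≥ 1, each visited once
  let st := (PySem.List.pyRange 1 n 1).foldl
    (fun (st : Int × Int) (i : Int) =>
      let ai := (PySem.List.pyGet? a i).getD 0
      let p := pvWhileA st.2 ai
      (max st.1 p.1, p.1)) (a0, a0)
  st.1

-- ===== PORT B =====
def max_blocks_alt (n : Int) (a : List Int) : Int :=
  let h0 := (PySem.List.pyGet? a 0).getD 0
  (PySem.List.pyRange 1 n 1).foldl
    (fun (h : Int) (i : Int) =>
      let ai := (PySem.List.pyGet? a i).getD 0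
      if ai > h then PySem.Int.floordiv (h + ai + 1) 2 else h) h0

-- ===== PRECONDITION & SPEC =====
-- exactly the inputs where Python A returns: a[0] must exist and every index of range(1,n) must be in range
def Pre_max_blocks (n : Int) (a : List Int) : Prop := a ≠ [] ∧ n ≤ (a.length : Int)
instance (n : Int) (a : List Int) : Decidable (Pre_max_blocks n a) := by unfold Pre_max_blocks; infer_instance
def pvWitness_max_blocks : Int × List Int := (3, [1, 5, 3])

def Spec_max_blocks (n : Int) (a : List Int) (out : Int) : Prop := out = max_blocks_alt n a
instance (n : Int) (a : List Int) (out : Int) : Decidable (Spec_max_blocks n a out) := by unfold Spec_max_blocks; infer_instance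

-- ===== CLAIM (what is proved, stated in full; the proofs are below) =====
def Claim_equal_max_blocks : Prop := ∀ (n : Int) (a : List Int), Dom_max_blocks n a → Pre_max_blocks n a → Spec_max_blocks n a (max_blocks n a)

-- ===== LEMMAS AND PROOFS =====

theorem pv_fdiv_two (x : Int) : Int.fdiv x 2 = x / 2 := by
  rw [Int.fdiv_eq_ediv]
  norm_num

-- the while loop's resulting a[0] is the closed form B uses
theorem pvWhileA_fst (a0 ai : Int) :
    (pvWhileA a0 ai).1 = if ai > a0 then PySem.Int.floordiv (a0 + ai + 1) 2 else a0 := by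
  unfold pvWhileA
  split_ifs with h
  · by_cases h2 : ai - 1 > a0 + 1
    · rw [pvWhileA_fst (a0 + 1) (ai - 1)]
      simp only [if_pos h2]
      congr 1
      omega
    · rw [pvWhileA_fst (a0 + 1) (ai - 1)]
      simp only [if_neg h2]
      rw [PySem.Int.floordiv, pv_fdiv_two]
      omega
  · rfl
termination_by (ai - a0).toNat
decreasing_by all_goals omega

theorem pvWhileA_fst_ge (a0 ai : Int) : a0 ≤ (pvWhileA a0 ai).1 := by
  rw [pvWhileA_fst]
  split_ifs with h
  · rw [PySem.Int.floordiv, pv_fdiv_two]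
    omega
  · exact le_refl _

-- the A-fold keeps its two components equal, and they track the B-fold
theorem fold_eq (l : List Int) (a : List Int) (h : Int) :
    l.foldl (fun (st : Int × Int) (i : Int) =>
      let ai := (PySem.List.pyGet? a i).getD 0
      let p := pvWhileA st.2 ai
      (max st.1 p.1, p.1)) (h, h)
    = (let g := l.foldl (fun (h : Int) (i : Int) =>
        let ai := (PySem.List.pyGet? a i).getD 0
        if ai > h then PySem.Int.floordiv (h + ai + 1) 2 else h) h
       (g, g)) := by
  induction l generalizing h with
  | nil => rfl
  | cons i t ih =>
    simp only [List.foldl_cons]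
    rw [max_eq_right (pvWhileA_fst_ge _ _), pvWhileA_fst]
    exact ih _

-- ===== VERDICT (by name: the statement is the Claim_ definition above) =====
theorem max_blocks_spec : Claim_equal_max_blocks := by
  intro n a _ _
  unfold Spec_max_blocks max_blocks max_blocks_alt
  simp only [fold_eq]
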